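-- pv_equiv track=rewrite | github.com/Mandarin1290/octa | octa_training/core/gates.py | _status_from_reasons
-- ===== SOURCE A (Python) =====
-- from typing import Any, Dict, List, Optional, Tuple, Union
--
-- def _status_from_reasons(reasons: List[str]) -> str:
--     """Classify failures in a fail-closed, audit-first manner."""
--     rs = [str(r or "") for r in (reasons or [])]
--     if any("data_load_failed" in r for r in rs):
--         return "FAIL_DATA"
--     if any("missing_walk_forward" in r for r in rs):
--         return "FAIL_STRUCTURAL"
--     risk_markers = (
--         "tail_kill_switch",
--         "tail_risk",
--         "cvar_",
--         "max_drawdown",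
--         "avg_gross_exposure",
--         "regime_stress_failed",
--     )
--     if any(any(m in r for m in risk_markers) for r in rs):
--         return "FAIL_RISK"
--     return "FAIL_STRUCTURAL"
-- ===== SOURCE B (Python) =====
-- def _status_from_reasons(reasons):
--     """Classify failures: rank each reason by its best matching class, take the
--     minimum rank over all reasons, and look the label up in a table."""
--     labels = ("FAIL_DATA", "FAIL_STRUCTURAL", "FAIL_RISK", "FAIL_STRUCTURAL")
--     marker_groups = (
--         ("data_load_failed",),
--         ("missing_walk_forward",),
--         ("tail_kill_switch", "tail_risk", "cvar_", "max_drawdown",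
--          "avg_gross_exposure", "regime_stress_failed"),
--     )
--
--     def rank(r):
--         r = str(r or "")
--         for i, ms in enumerate(marker_groups):
--             if any(m in r for m in ms):
--                 return i
--         return len(marker_groups)
--
--     return labels[min((rank(r) for r in (reasons or [])), default=3)]
-- ===== Notes on version B (the rewrite author's own statement) =====
-- stated objective: alternative
-- what changed: Replaced A's prioritized sequence of full any()-scans with a map/reduce: each reason is ranked by the lowest-index marker group it matches, the ranks are reduced with min (default 3), and the result indexes a label table.
import Mathlib
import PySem

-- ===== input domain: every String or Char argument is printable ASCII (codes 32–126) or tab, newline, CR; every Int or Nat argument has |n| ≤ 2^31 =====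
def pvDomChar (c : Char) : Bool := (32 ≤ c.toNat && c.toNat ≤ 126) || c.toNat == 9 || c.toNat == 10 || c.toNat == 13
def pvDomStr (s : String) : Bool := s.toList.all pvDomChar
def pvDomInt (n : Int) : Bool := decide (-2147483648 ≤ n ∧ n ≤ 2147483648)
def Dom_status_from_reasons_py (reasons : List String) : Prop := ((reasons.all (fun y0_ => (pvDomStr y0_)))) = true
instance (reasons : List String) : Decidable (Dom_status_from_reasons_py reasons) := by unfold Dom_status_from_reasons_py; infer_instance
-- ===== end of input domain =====

-- B replaces A's prioritized full scans with a map/min-reduce: rank each reason by its best matching marker group, take the minimum rank, index a label table (alternative decomposition, same cost).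


-- ===== PORT A =====
def pvRiskMarkers : List String :=
  ["tail_kill_switch", "tail_risk", "cvar_", "max_drawdown",
   "avg_gross_exposure", "regime_stress_failed"]

def status_from_reasons_py (reasons : List String) : String :=
  -- rs = [str(r or "") for r in (reasons or [])]; on strings, str(r or "") is "" if r == "" else r
  let rs := reasons.map (fun r => if r == "" then "" else r)
  if rs.any (fun r => PySem.Str.isIn "data_load_failed" r) then "FAIL_DATA"
  else if rs.any (fun r => PySem.Str.isIn "missing_walk_forward" r) then "FAIL_STRUCTURAL"
  else if rs.any (fun r => pvRiskMarkers.any (fun m => PySem.Str.isIn m r)) then "FAIL_RISK"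
  else "FAIL_STRUCTURAL"

-- ===== PORT B =====
def pvLabels : List String := ["FAIL_DATA", "FAIL_STRUCTURAL", "FAIL_RISK", "FAIL_STRUCTURAL"]

def pvMarkerGroups : List (List String) :=
  [["data_load_failed"],
   ["missing_walk_forward"],
   ["tail_kill_switch", "tail_risk", "cvar_", "max_drawdown",
    "avg_gross_exposure", "regime_stress_failed"]]

-- rank(r): index of the first marker group matching r (the for/return loop = first match on the
-- enumerated groups), else len(marker_groups)
def pvRank (r0 : String) : Int :=
  let r := if r0 == "" then "" else r0   -- r = str(r or "")
  match (PySem.List.enumerate pvMarkerGroups).find? (fun p => p.2.any (fun m => PySem.Str.isIn m r)) with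
  | some p => p.1
  | none => pvMarkerGroups.length

-- labels[min((rank(r) for r in (reasons or [])), default=3)]
def status_from_reasons_py_alt (reasons : List String) : String :=
  PySem.List.pyGetD pvLabels (reasons.foldl (fun a r => min a (pvRank r)) 3) ""

-- ===== PRECONDITION & SPEC =====
def Spec_status_from_reasons_py (reasons : List String) (out : String) : Prop := out = status_from_reasons_py_alt reasons
instance (reasons : List String) (out : String) : Decidable (Spec_status_from_reasons_py reasons out) := by unfold Spec_status_from_reasons_py; infer_instance

-- ===== CLAIM (what is proved, stated in full; the proofs are below) =====
def Claim_equal_status_from_reasons_py : Prop := ∀ (reasons : List String), Dom_status_from_reasons_py reasons → Spec_status_from_reasons_py reasons (status_from_reasons_py reasons)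

-- ===== LEMMAS AND PROOFS =====

-- proof-side abbreviation: the rank determined by the three membership flags
def pvClass (b1 b2 b3 : Bool) : Int :=
  if b1 then 0 else if b2 then 1 else if b3 then 2 else 3

-- str(r or "") is the identity on strings
theorem pvNorm_id (r : String) : (if r == "" then "" else r) = r := by
  by_cases h : r = "" <;> simp [h]

theorem pvClass_min (a1 a2 a3 b1 b2 b3 : Bool) :
    min (pvClass a1 a2 a3) (pvClass b1 b2 b3) = pvClass (a1 || b1) (a2 || b2) (a3 || b3) := by
  revert a1 a2 a3 b1 b2 b3; decide

theorem pvEnumerate_groups :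
    PySem.List.enumerate pvMarkerGroups =
      [(0, ["data_load_failed"]),
       (1, ["missing_walk_forward"]),
       (2, ["tail_kill_switch", "tail_risk", "cvar_", "max_drawdown",
            "avg_gross_exposure", "regime_stress_failed"])] := by
  decide

-- rank as the class of the three membership flags
theorem pvRank_eq (r : String) :
    pvRank r = pvClass (PySem.Str.isIn "data_load_failed" r)
                       (PySem.Str.isIn "missing_walk_forward" r)
                       ((["tail_kill_switch", "tail_risk", "cvar_", "max_drawdown",
                          "avg_gross_exposure", "regime_stress_failed"] : List String).any
                          (fun m => PySem.Str.isIn m r)) := by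
  unfold pvRank
  rw [pvNorm_id, pvEnumerate_groups]
  cases h1 : (["data_load_failed"] : List String).any (fun m => PySem.Str.isIn m r) <;>
  cases h2 : (["missing_walk_forward"] : List String).any (fun m => PySem.Str.isIn m r) <;>
  cases h3 : (["tail_kill_switch", "tail_risk", "cvar_", "max_drawdown",
               "avg_gross_exposure", "regime_stress_failed"] : List String).any
               (fun m => PySem.Str.isIn m r) <;>
  simp only [List.find?, h1, h2, h3] <;>
  simp only [List.any_cons, List.any_nil, Bool.or_false] at h1 h2 <;>
  simp at h1 h2 <;>
  simp [pvClass, pvMarkerGroups, h1, h2, h3]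

-- the min-fold over ranks merges the three flags across the list
theorem pvFold_min (l : List String) (b1 b2 b3 : Bool) :
    l.foldl (fun a r => min a (pvRank r)) (pvClass b1 b2 b3) =
      pvClass (b1 || l.any (fun r => PySem.Str.isIn "data_load_failed" r))
              (b2 || l.any (fun r => PySem.Str.isIn "missing_walk_forward" r))
              (b3 || l.any (fun r => (["tail_kill_switch", "tail_risk", "cvar_", "max_drawdown",
                                      "avg_gross_exposure", "regime_stress_failed"] : List String).any
                                      (fun m => PySem.Str.isIn m r))) := by
  induction l generalizing b1 b2 b3 with
  | nil => simp
  | cons x xs ih =>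
    rw [List.foldl_cons, pvRank_eq, pvClass_min, ih]
    simp only [List.any_cons, Bool.or_assoc]

-- the priority chain of A equals the table lookup at the class index
theorem pvTable (c1 c2 c3 : Bool) :
    (if c1 = true then "FAIL_DATA"
     else if c2 = true then "FAIL_STRUCTURAL"
     else if c3 = true then "FAIL_RISK"
     else "FAIL_STRUCTURAL") = PySem.List.pyGetD pvLabels (pvClass c1 c2 c3) "" := by
  revert c1 c2 c3; decide

-- ===== VERDICT (by name: the statement is the Claim_ definition above) =====
theorem status_from_reasons_py_spec : Claim_equal_status_from_reasons_py := by
  intro reasons _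
  unfold Spec_status_from_reasons_py status_from_reasons_py status_from_reasons_py_alt
  rw [show (3 : Int) = pvClass false false false from rfl, pvFold_min]
  simp only [Bool.false_or, List.any_map, Function.comp_def, pvNorm_id, pvRiskMarkers]
  exact pvTable _ _ _
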